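-- pv_equiv track=rewrite | github.com/anvk109/ergasia | LemmaGen Lemmatizer/Learn_Lemmagen_RDR.py | determine_transformation
-- ===== SOURCE A (Python) =====
-- def determine_transformation(word, lemma):
--     if word == lemma:
--         return '""-->""'
--
--     # Find the first position where the two strings differ
--     for i in range(min(len(word), len(lemma))):
--         if word[i] != lemma[i]:
--             break
--     else:
--         i = min(len(word), len(lemma))
--
--     # Find the suffixes of the word and lemma starting from the differing position
--     word_suffix = word[i:]
--     lemma_suffix = lemma[i:]
--
--     return f'"{word_suffix}"-->"{lemma_suffix}"'
-- ===== SOURCE B (Python) =====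
-- def determine_transformation(word, lemma):
--     # Peel the common prefix by repeated slicing; the suffix pair drops out directly.
--     w, l = word, lemma
--     while w and l and w[0] == l[0]:
--         w, l = w[1:], l[1:]
--     return f'"{w}"-->"{l}"'
-- ===== Notes on version B (the rewrite author's own statement) =====
-- stated objective: simpler
-- what changed: Drops the redundant word==lemma guard and the indexed for/else scan: B peels the shared prefix off both strings directly and returns the two remaining suffixes, never computing an index.
import Mathlib
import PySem

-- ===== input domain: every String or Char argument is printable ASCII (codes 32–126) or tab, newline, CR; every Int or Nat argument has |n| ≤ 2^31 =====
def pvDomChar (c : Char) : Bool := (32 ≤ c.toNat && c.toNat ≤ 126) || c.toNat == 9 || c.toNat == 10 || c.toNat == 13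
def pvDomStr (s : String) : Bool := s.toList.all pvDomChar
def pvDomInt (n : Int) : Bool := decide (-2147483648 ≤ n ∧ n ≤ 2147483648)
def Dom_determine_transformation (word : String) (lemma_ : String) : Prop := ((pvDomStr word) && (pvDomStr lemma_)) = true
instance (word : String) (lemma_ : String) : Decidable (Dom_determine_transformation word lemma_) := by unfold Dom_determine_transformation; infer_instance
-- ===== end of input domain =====

-- B drops A's redundant equality guard and indexed scan, peeling the common prefix instead (objective: simpler).

-- ===== PORT A =====
-- A's for-loop over range(min(len(word), len(lemma))) with break/else: returns the break
-- index, or n when the loop finishes without break (Python's for/else; also when n = 0).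
def aScan (w l : List Char) (n i : Nat) : Nat :=
  if _h : i < n then
    if w.getD i ' ' ≠ l.getD i ' ' then i else aScan w l n (i + 1)
  else n
termination_by n - i

def determine_transformation (word : String) (lemma_ : String) : String :=
  if word = lemma_ then "\"\"-->\"\""
  else
    let w := word.toList
    let l := lemma_.toList
    let i := aScan w l (min w.length l.length) 0
    "\"" ++ String.ofList (w.drop i) ++ "\"-->\"" ++ String.ofList (l.drop i) ++ "\""

-- ===== PORT B =====
-- B's while loop: strip the first character from both strings while they agree.
def bPeel : List Char → List Char → List Char × List Char
  | a :: as, b :: bs => if a = b then bPeel as bs else (a :: as, b :: bs)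
  | w, l => (w, l)

def determine_transformation_alt (word : String) (lemma_ : String) : String :=
  let p := bPeel word.toList lemma_.toList
  "\"" ++ String.ofList p.1 ++ "\"-->\"" ++ String.ofList p.2 ++ "\""

-- ===== PRECONDITION & SPEC =====
def Spec_determine_transformation (word : String) (lemma_ : String) (out : String) : Prop := out = determine_transformation_alt word lemma_
instance (word : String) (lemma_ : String) (out : String) : Decidable (Spec_determine_transformation word lemma_ out) := by unfold Spec_determine_transformation; infer_instance

-- ===== CLAIM (what is proved, stated in full; the proofs are below) =====
def Claim_equal_determine_transformation : Prop := ∀ (word : String) (lemma_ : String), Dom_determine_transformation word lemma_ → Spec_determine_transformation word lemma_ (determine_transformation word lemma_)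

-- ===== LEMMAS AND PROOFS =====

theorem aScan_shift (a b : Char) (w l : List Char) (n i : Nat) :
    aScan (a :: w) (b :: l) (n + 1) (i + 1) = aScan w l n i + 1 := by
  fun_induction aScan w l n i with
  | case1 i hlt hne =>
      rw [aScan, dif_pos (by omega)]
      simp only [List.getD_cons_succ]
      rw [if_pos hne]
  | case2 i hlt heq ih =>
      rw [aScan, dif_pos (by omega)]
      simp only [List.getD_cons_succ]
      rw [if_neg heq]
      exact ih
  | case3 i hnlt =>
      rw [aScan, dif_neg (by omega)]

theorem aScan_eq_peel (w l : List Char) :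
    (w.drop (aScan w l (min w.length l.length) 0),
     l.drop (aScan w l (min w.length l.length) 0)) = bPeel w l := by
  induction w generalizing l with
  | nil =>
      rw [aScan]
      cases l <;> simp [bPeel]
  | cons a w ih =>
      cases l with
      | nil =>
          rw [aScan]
          simp [bPeel]
      | cons b l =>
          have hmin : min (a :: w).length (b :: l).length = min w.length l.length + 1 := by
            simp [Nat.succ_min_succ]
          rw [aScan, dif_pos (by omega)]
          simp only [List.getD_cons_zero]
          by_cases hab : a = b
          · rw [if_neg (by simp [hab]), hmin, aScan_shift]
            simp only [List.drop_succ_cons]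
            rw [bPeel, if_pos hab]
            exact ih l
          · rw [if_pos (by simpa using hab)]
            simp [bPeel, hab]

theorem bPeel_self (w : List Char) : bPeel w w = ([], []) := by
  induction w with
  | nil => rfl
  | cons a w ih => rw [bPeel, if_pos rfl, ih]

-- ===== VERDICT (by name: the statement is the Claim_ definition above) =====
theorem determine_transformation_spec : Claim_equal_determine_transformation := by
  intro word lemma_ _
  unfold Spec_determine_transformation determine_transformation determine_transformation_alt
  by_cases h : word = lemma_
  · rw [if_pos h, h, bPeel_self]
    rfl
  · rw [if_neg h]
    simp only []
    rw [← aScan_eq_peel word.toList lemma_.toList]
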